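-- pv_equiv track=rewrite | github.com/topherjaynes/AdventCode | Day9/input9.py | find_rightmost_file
-- ===== SOURCE A (Python) =====
-- def find_rightmost_file(blocks):
--     """Find the rightmost file block and its starting position."""
--     # Convert to list for easier manipulation
--     blocks_list = list(blocks)
--     # Work backwards to find first non-'.' character
--     for i in range(len(blocks_list) - 1, -1, -1):
--         if blocks_list[i] != '.':
--             # Find start of this file block
--             file_id = blocks_list[i]
--             while i >= 0 and blocks_list[i] == file_id:
--                 i -= 1
--             return file_id, i + 1
--     return None, None
-- ===== SOURCE B (Python) =====
-- def find_rightmost_file(blocks):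
--     """Find the rightmost file block and its starting position."""
--     best = (None, None)
--     prev = None
--     for pos, x in enumerate(list(blocks)):
--         if x != '.' and x != prev:
--             best = (x, pos)
--         prev = x
--     return best
-- ===== Notes on version B (the rewrite author's own statement) =====
-- stated objective: simpler
-- what changed: Single forward pass recording the start of each non-dot run (element differing from its predecessor) and keeping the last one, instead of scanning backward and then walking left through the run.
import Mathlib
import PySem

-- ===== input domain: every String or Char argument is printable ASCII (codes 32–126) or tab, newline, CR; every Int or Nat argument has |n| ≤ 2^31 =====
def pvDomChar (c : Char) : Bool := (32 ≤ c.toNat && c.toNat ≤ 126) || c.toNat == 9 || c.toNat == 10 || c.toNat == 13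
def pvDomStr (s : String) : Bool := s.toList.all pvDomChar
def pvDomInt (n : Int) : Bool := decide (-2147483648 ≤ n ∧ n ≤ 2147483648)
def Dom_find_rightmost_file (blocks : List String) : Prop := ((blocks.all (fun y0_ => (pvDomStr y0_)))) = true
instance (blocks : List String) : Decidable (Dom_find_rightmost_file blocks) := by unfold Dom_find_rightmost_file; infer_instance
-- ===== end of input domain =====

-- B replaces A's backward scan + leftward walk by a single forward pass that records
-- the start of each non-dot run and keeps the last record (objective: simpler).

-- ===== PORT A =====
-- the inner `while i >= 0 and blocks_list[i] == file_id: i -= 1; return i + 1`,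
-- with i kept as a Nat index (i = 0 matching returns 0, i.e. Python's -1 + 1)
def aWhile (blocks : List String) (fid : String) : Nat → Int
  | 0 => if blocks.getD 0 "" = fid then 0 else 1
  | k+1 => if blocks.getD (k+1) "" = fid then aWhile blocks fid k else ((k : Int) + 2)

-- the outer `for i in range(len(blocks_list) - 1, -1, -1)`: fuel k+1 means next index is k
def aOuter (blocks : List String) : Nat → Option String × Option Int
  | 0 => (none, none)
  | k+1 =>
    let x := blocks.getD k ""
    if x ≠ "." then (some x, some (aWhile blocks x k)) else aOuter blocks k

def find_rightmost_file (blocks : List String) : Option String × Option Int :=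
  aOuter blocks blocks.length

-- ===== PORT B =====
-- state: (best so far, prev element, current position)
def bStep (st : (Option String × Option Int) × Option String × Int) (x : String) :
    (Option String × Option Int) × Option String × Int :=
  ((if x ≠ "." ∧ some x ≠ st.2.1 then (some x, some st.2.2) else st.1), some x, st.2.2 + 1)

def find_rightmost_file_alt (blocks : List String) : Option String × Option Int :=
  (blocks.foldl bStep ((none, none), none, 0)).1

-- ===== PRECONDITION & SPEC =====
def Spec_find_rightmost_file (blocks : List String) (out : Option String × Option Int) : Prop := out = find_rightmost_file_alt blocks
instance (blocks : List String) (out : Option String × Option Int) : Decidable (Spec_find_rightmost_file blocks out) := by unfold Spec_find_rightmost_file; infer_instance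

-- ===== CLAIM (what is proved, stated in full; the proofs are below) =====
def Claim_equal_find_rightmost_file : Prop := ∀ (blocks : List String), Dom_find_rightmost_file blocks → Spec_find_rightmost_file blocks (find_rightmost_file blocks)

-- ===== LEMMAS AND PROOFS =====

-- getD over an append, the two cases used below
theorem getD_app_lt (l l' : List String) (d : String) (n : Nat) (h : n < l.length) :
    (l ++ l').getD n d = l.getD n d := by
  simp only [List.getD_eq_getElem?_getD, List.getElem?_append_left h]

theorem getD_app_self (l : List String) (x d : String) :
    (l ++ [x]).getD l.length d = x := by
  simp [List.getD_eq_getElem?_getD]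

-- the second and third state components of B's fold are the last element and the length
theorem bFold_snd (l : List String) :
    (l.foldl bStep ((none, none), none, 0)).2 = (l.getLast?, (l.length : Int)) := by
  induction l using List.reverseRecOn with
  | nil => rfl
  | append_singleton l x ih =>
    simp [List.foldl_append, bStep, ih]

theorem aWhile_append (l : List String) (x fid : String) :
    ∀ k, k < l.length → aWhile (l ++ [x]) fid k = aWhile l fid k := by
  intro k
  induction k with
  | zero =>
    intro h
    simp only [aWhile, getD_app_lt l [x] "" 0 h]
  | succ k ih =>
    intro h
    simp only [aWhile, getD_app_lt l [x] "" (k+1) h]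
    split
    · exact ih (Nat.lt_of_succ_lt h)
    · rfl

theorem aWhile_stop (l : List String) (fid : String) (k : Nat)
    (h : l.getD k "" ≠ fid) : aWhile l fid k = (k : Int) + 1 := by
  cases k with
  | zero => simp only [aWhile, if_neg h]; norm_num
  | succ k => simp only [aWhile, if_neg h]; push_cast; ring

theorem aOuter_append (l : List String) (x : String) :
    ∀ k, k ≤ l.length → aOuter (l ++ [x]) k = aOuter l k := by
  intro k
  induction k with
  | zero => intro _; rfl
  | succ k ih =>
    intro h
    have hk : k < l.length := h
    simp only [aOuter, getD_app_lt l [x] "" k hk]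
    split
    · rw [aWhile_append l x _ k hk]
    · exact ih (Nat.le_of_lt hk)

theorem getD_last (l : List String) (x : String) (h : l.getLast? = some x) :
    l.getD (l.length - 1) "" = x := by
  rw [List.getLast?_eq_getElem?] at h
  simp [List.getD_eq_getElem?_getD, h]

-- the rightmost non-dot run: if l ends in x ≠ ".", B's best is (x, start of trailing run),
-- and that start is what A's inner walk computes from the last index
theorem bFold_trail (l : List String) :
    ∀ x, l.getLast? = some x → x ≠ "." →
    (l.foldl bStep ((none, none), none, 0)).1 = (some x, some (aWhile l x (l.length - 1))) := by
  induction l using List.reverseRecOn with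
  | nil => intro x h; simp at h
  | append_singleton l y ih =>
    intro x h hx
    have hxy : y = x := by simpa using h
    subst hxy
    have hsnd := bFold_snd l
    simp only [List.foldl_append, List.foldl_cons, List.foldl_nil, bStep, hsnd]
    cases hl : l.getLast? with
    | none =>
      have hnil : l = [] := List.getLast?_eq_none_iff.mp hl
      subst hnil
      simp [aWhile, hx]
    | some p =>
      have hne : l ≠ [] := by
        intro h'; subst h'; simp at hl
      have hlen : l.length - 1 + 1 = l.length := Nat.succ_pred_eq_of_pos (List.length_pos_iff.mpr hne)
      have hstep : aWhile (l ++ [y]) y ((l ++ [y]).length - 1) = aWhile l y (l.length - 1) := by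
        have h1 : (l ++ [y]).length - 1 = l.length - 1 + 1 := by simp [hlen]
        rw [h1]
        have hget : (l ++ [y]).getD (l.length - 1 + 1) "" = y := by
          rw [hlen]; exact getD_app_self l y ""
        simp only [aWhile, hget]
        exact aWhile_append l y y (l.length - 1) (by omega)
      by_cases hpy : p = y
      · subst hpy
        have hbest := ih p hl hx
        simp only [hstep]
        simp [hbest]
      · have hcond : (y ≠ "." ∧ some y ≠ some p) := ⟨hx, by simp; exact fun h' => hpy h'.symm⟩
        have hstop : aWhile l y (l.length - 1) = ((l.length - 1 : Nat) : Int) + 1 := by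
          apply aWhile_stop
          rw [getD_last l p hl]
          exact fun h' => hpy h'
        simp only [hstep, hstop]
        simp [hcond]
        omega

theorem main_eq (l : List String) :
    aOuter l l.length = (l.foldl bStep ((none, none), none, 0)).1 := by
  induction l using List.reverseRecOn with
  | nil => rfl
  | append_singleton l x ih =>
    have hsnd := bFold_snd l
    have hlen : (l ++ [x]).length = l.length + 1 := by simp
    rw [hlen]
    have hget : (l ++ [x]).getD l.length "" = x := getD_app_self l x ""
    simp only [aOuter, hget, List.foldl_append, List.foldl_cons, List.foldl_nil, bStep, hsnd]
    by_cases hx : x = "."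
    · subst hx
      rw [if_neg (by simp), if_neg (by simp)]
      rw [aOuter_append l "." l.length (Nat.le_refl _)]
      exact ih
    · cases hl : l.getLast? with
      | none =>
        have hnil : l = [] := List.getLast?_eq_none_iff.mp hl
        subst hnil
        simp [aWhile, hx]
      | some p =>
        have hne : l ≠ [] := by intro h'; subst h'; simp at hl
        have hlen1 : l.length - 1 + 1 = l.length := Nat.succ_pred_eq_of_pos (List.length_pos_iff.mpr hne)
        have hstep : aWhile (l ++ [x]) x l.length = aWhile l x (l.length - 1) := by
          conv_lhs => rw [← hlen1]
          have hget1 : (l ++ [x]).getD (l.length - 1 + 1) "" = x := by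
            rw [hlen1]; exact hget
          simp only [aWhile, hget1]
          exact aWhile_append l x x (l.length - 1) (by omega)
        by_cases hpx : p = x
        · subst hpx
          have hbest := bFold_trail l p hl hx
          simp [hx, hstep, hbest]
        · have hstop : aWhile l x (l.length - 1) = ((l.length - 1 : Nat) : Int) + 1 := by
            apply aWhile_stop
            rw [getD_last l p hl]
            exact fun h' => hpx h'
          have hcond : (x ≠ "." ∧ some x ≠ some p) := ⟨hx, by simp; exact fun h' => hpx h'.symm⟩
          simp only [if_pos hx, hstep, hstop]
          simp [hcond]
          omega

-- ===== VERDICT (by name: the statement is the Claim_ definition above) =====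
theorem find_rightmost_file_spec : Claim_equal_find_rightmost_file := by
  intro blocks _
  unfold Spec_find_rightmost_file find_rightmost_file find_rightmost_file_alt
  exact main_eq blocks
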